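-- pv_equiv track=rewrite | github.com/Jatinbhardwaj-093/Spider-Web | Backend/main.py | _extract_relevant_excerpt
-- ===== SOURCE A (Python) =====
-- from typing import List, Optional
--
-- def _extract_relevant_excerpt(content: str, keywords: List[str], max_length: int = 1200) -> str:
--     """Extract the most relevant excerpt from content based on keywords."""
--     if not content or not keywords:
--         return content[:max_length] + "..." if len(content) > max_length else content
--
--     content_lower = content.lower()
--
--     # Find sentences that contain keywords
--     sentences = [s.strip() for s in content.split('.') if s.strip()]
--     scored_sentences = []
--
--     for i, sentence in enumerate(sentences):
--         sentence_lower = sentence.lower()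
--         keyword_count = sum(1 for keyword in keywords if keyword in sentence_lower)
--
--         if keyword_count > 0:
--             # Include context: previous and next sentence for better coherence
--             context_sentences = []
--             if i > 0:  # Add previous sentence for context
--                 context_sentences.append(sentences[i-1])
--             context_sentences.append(sentence)
--             if i < len(sentences) - 1:  # Add next sentence for context
--                 context_sentences.append(sentences[i+1])
--
--             context_text = '. '.join(context_sentences) + '.'
--             scored_sentences.append((context_text, keyword_count, i))
--
--     if scored_sentences:
--         # Sort by keyword count and take the best result
--         scored_sentences.sort(key=lambda x: x[1], reverse=True)
--
--         # Take the best matching excerpt and ensure it's complete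
--         best_excerpt = scored_sentences[0][0]
--
--         # If it's still too long, try to find a good breaking point
--         if len(best_excerpt) > max_length:
--             # Try to break at sentence boundaries
--             sentences_in_excerpt = best_excerpt.split('.')
--             result = ""
--             for sentence in sentences_in_excerpt:
--                 if len(result + sentence + '.') <= max_length:
--                     result += sentence + '.'
--                 else:
--                     break
--             return result.strip() if result else best_excerpt[:max_length] + "..."
--
--         return best_excerpt.strip()
--
--     # Fallback to beginning of content
--     return content[:max_length] + "..." if len(content) > max_length else content
-- ===== SOURCE B (Python) =====
-- def _extract_relevant_excerpt(content, keywords, max_length=1200):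
--     """Single linear pass: track the first sentence index attaining the maximum
--     keyword count instead of building and sorting a scored list."""
--     if not content or not keywords:
--         return content[:max_length] + "..." if len(content) > max_length else content
--
--     sentences = [s.strip() for s in content.split('.') if s.strip()]
--
--     best_count = 0
--     best_i = -1
--     for i, sentence in enumerate(sentences):
--         sl = sentence.lower()
--         c = sum(1 for k in keywords if k in sl)
--         if c > best_count:
--             best_count = c
--             best_i = i
--
--     if best_i < 0:
--         # No sentence mentions a keyword: fall back to the beginning of content.
--         return content[:max_length] + "..." if len(content) > max_length else content
--
--     # Context excerpt (previous + winning + next sentence) built only for the winner.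
--     best_excerpt = '. '.join(sentences[max(best_i - 1, 0):best_i + 2]) + '.'
--
--     if len(best_excerpt) > max_length:
--         result = ""
--         for s in best_excerpt.split('.'):
--             if len(result + s + '.') <= max_length:
--                 result += s + '.'
--             else:
--                 break
--         return result.strip() if result else best_excerpt[:max_length] + "..."
--     return best_excerpt.strip()
-- ===== Notes on version B (the rewrite author's own statement) =====
-- stated objective: simpler
-- what changed: Replaces the build-score-sort pipeline (context excerpt materialised for every keyword-matching sentence, then a stable descending sort to pick the head) by one linear pass that tracks the first index attaining the maximum keyword count, building the context excerpt only for that winner.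
import Mathlib
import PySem

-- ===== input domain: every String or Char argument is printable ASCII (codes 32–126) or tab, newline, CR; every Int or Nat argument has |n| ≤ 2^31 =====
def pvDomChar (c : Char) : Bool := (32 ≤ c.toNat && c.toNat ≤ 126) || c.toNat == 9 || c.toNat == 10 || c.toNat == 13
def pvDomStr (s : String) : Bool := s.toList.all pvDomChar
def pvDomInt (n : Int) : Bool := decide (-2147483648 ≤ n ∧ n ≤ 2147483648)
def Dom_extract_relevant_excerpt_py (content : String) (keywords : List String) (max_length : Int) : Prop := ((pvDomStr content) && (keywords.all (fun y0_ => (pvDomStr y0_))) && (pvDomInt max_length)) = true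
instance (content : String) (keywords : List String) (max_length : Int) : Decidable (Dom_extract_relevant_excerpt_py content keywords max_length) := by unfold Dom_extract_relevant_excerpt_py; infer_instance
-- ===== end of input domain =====

-- B replaces A's score-every-sentence-then-stable-sort selection by one linear pass that
-- remembers the first index attaining the maximum keyword count (objective: simpler).

-- Helpers shared by both ports (this code is identical in both Pythons):
-- content[:max_length] + "..." if len(content) > max_length else content
def pvFallback (content : String) (max_length : Int) : String :=
  if PySem.Str.len content > max_length
  then PySem.Str.slice content none (some max_length) ++ "..."
  else content

-- [s.strip() for s in content.split('.') if s.strip()]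
def pvSentences (content : String) : List String :=
  ((PySem.Str.split? content ".").getD []).filterMap
    (fun s => let t := PySem.Str.strip s; if t = "" then none else some t)

-- sum(1 for keyword in keywords if keyword in sentence.lower())
def pvCount (keywords : List String) (sentence : String) : Int :=
  ((keywords.filter (fun k => PySem.Str.isIn k (PySem.Str.lower sentence))).length : Int)

-- the trimming loop (with break) shared verbatim by A and B
def pvTrimLoop (max_length : Int) : List String → String → String
  | [], result => result
  | s :: rest, result =>
    if PySem.Str.len (result ++ s ++ ".") ≤ max_length
    then pvTrimLoop max_length rest (result ++ s ++ ".")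
    else result

-- the "if it's still too long …" block shared verbatim by A and B
def pvTrim (best : String) (max_length : Int) : String :=
  if PySem.Str.len best > max_length then
    let result := pvTrimLoop max_length ((PySem.Str.split? best ".").getD []) ""
    if result = "" then PySem.Str.slice best none (some max_length) ++ "..."
    else PySem.Str.strip result
  else PySem.Str.strip best

-- ===== PORT A =====
-- '. '.join(context_sentences) + '.' with A's three-way context construction
def pvContextA (sentences : List String) (i : Int) (sentence : String) : String :=
  PySem.Str.join ". "
    ((if i > 0 then [(PySem.List.pyGet? sentences (i - 1)).getD ""] else []) ++
     [sentence] ++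
     (if i < (sentences.length : Int) - 1 then [(PySem.List.pyGet? sentences (i + 1)).getD ""] else [])) ++ "."

def extract_relevant_excerpt_py (content : String) (keywords : List String) (max_length : Int) : String :=
  if content = "" ∨ keywords = [] then pvFallback content max_length
  else
    let _content_lower := PySem.Str.lower content  -- computed but unused in A
    let sentences := pvSentences content
    let scored : List (String × Int × Int) :=
      (PySem.List.enumerate sentences).foldl (fun acc p =>
        let keyword_count := pvCount keywords p.2
        if keyword_count > 0 then
          acc ++ [(pvContextA sentences p.1 p.2, keyword_count, p.1)]
        else acc) []
    match PySem.List.sorted scored (fun x => x.2.1) true with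
    | [] => pvFallback content max_length
    | best :: _ => pvTrim best.1 max_length

-- ===== PORT B =====
-- '. '.join(sentences[max(best_i - 1, 0):best_i + 2]) + '.'
def pvContextB (sentences : List String) (i : Int) : String :=
  PySem.Str.join ". " (PySem.List.slice sentences (some (max (i - 1) 0)) (some (i + 2))) ++ "."

def extract_relevant_excerpt_py_alt (content : String) (keywords : List String) (max_length : Int) : String :=
  if content = "" ∨ keywords = [] then pvFallback content max_length
  else
    let sentences := pvSentences content
    let best :=
      (PySem.List.enumerate sentences).foldl
        (fun (acc : Int × Int) p =>
          let c := pvCount keywords p.2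
          if c > acc.1 then (c, p.1) else acc) (0, -1)
    if best.2 < 0 then pvFallback content max_length
    else pvTrim (pvContextB sentences best.2) max_length

-- ===== PRECONDITION & SPEC =====
def Spec_extract_relevant_excerpt_py (content : String) (keywords : List String) (max_length : Int) (out : String) : Prop := out = extract_relevant_excerpt_py_alt content keywords max_length
instance (content : String) (keywords : List String) (max_length : Int) (out : String) : Decidable (Spec_extract_relevant_excerpt_py content keywords max_length out) := by unfold Spec_extract_relevant_excerpt_py; infer_instance

-- ===== CLAIM (what is proved, stated in full; the proofs are below) =====
def Claim_equal_extract_relevant_excerpt_py : Prop := ∀ (content : String) (keywords : List String) (max_length : Int), Dom_extract_relevant_excerpt_py content keywords max_length → Spec_extract_relevant_excerpt_py content keywords max_length (extract_relevant_excerpt_py content keywords max_length)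

-- ===== LEMMAS AND PROOFS =====

-- the running "first maximum", as an Option-valued fold step
def pvBestO {α : Type} (key : α → Int) (acc : Option α) (x : α) : Option α :=
  some (match acc with | none => x | some y => if key y < key x then x else y)

-- B's loop step
def pvStep (keywords : List String) (acc : Int × Int) (q : Int × String) : Int × Int :=
  let c := pvCount keywords q.2
  if c > acc.1 then (c, q.1) else acc

theorem pvHead_insertBy {α : Type} (key : α → Int) (x : α) (acc : List α) :
    (PySem.List.insertBy (fun a b => decide (key b < key a)) x acc).head? =
      pvBestO key acc.head? x := by
  cases acc with
  | nil => rfl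
  | cons y ys =>
    simp only [PySem.List.insertBy, pvBestO, List.head?]
    split_ifs with h <;> simp_all

theorem pvL1aux {α : Type} (key : α → Int) (xs : List α) : ∀ (acc : List α),
    (xs.foldl (fun acc x => PySem.List.insertBy (fun a b => decide (key b < key a)) x acc) acc).head?
      = xs.foldl (pvBestO key) acc.head? := by
  induction xs with
  | nil => intro acc; rfl
  | cons x t ih =>
    intro acc
    simp only [List.foldl_cons, ih, pvHead_insertBy]

-- head of Python's stable descending sort = running first-maximum fold
theorem pvL1 {α : Type} (key : α → Int) (xs : List α) :
    (PySem.List.sorted xs key true).head? = xs.foldl (pvBestO key) none := by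
  rw [PySem.List.sorted_rev_eq_foldl_insertBy]
  simpa using pvL1aux key xs []

theorem pvBestO_mem {α : Type} (key : α → Int) (xs : List α) : ∀ (acc : Option α) (y : α),
    xs.foldl (pvBestO key) acc = some y → y ∈ xs ∨ acc = some y := by
  induction xs with
  | nil => intro acc y h; right; exact h
  | cons x t ih =>
    intro acc y h
    rcases ih _ _ h with h1 | h1
    · left; exact List.mem_cons_of_mem _ h1
    · simp only [pvBestO, Option.some.injEq] at h1
      split at h1
      · left; simp [← h1]
      · split at h1 <;> simp_all

-- zero-count sentences never move B's accumulator, so the loop may skip them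
theorem pvSkip (kw : List String) (l : List (Int × String)) : ∀ (acc : Int × Int), 0 ≤ acc.1 →
    l.foldl (pvStep kw) acc
      = (l.filter (fun q => decide (pvCount kw q.2 > 0))).foldl (pvStep kw) acc := by
  induction l with
  | nil => intro acc h; rfl
  | cons q t ih =>
    intro acc h
    by_cases hq : pvCount kw q.2 > 0
    · simp only [List.foldl_cons, List.filter_cons, hq, decide_true, if_true]
      by_cases hgt : pvCount kw q.2 > acc.1
      · rw [show pvStep kw acc q = (pvCount kw q.2, q.1) by simp [pvStep, hgt]]
        exact ih _ (le_of_lt hq)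
      · rw [show pvStep kw acc q = acc by simp [pvStep, hgt]]
        exact ih _ h
    · have hngt : ¬ (pvCount kw q.2 > acc.1) := by omega
      simp only [List.foldl_cons, List.filter_cons, hq, decide_false]
      rw [show pvStep kw acc q = acc by simp [pvStep, hngt]]
      exact ih _ h

-- B's pair fold tracks exactly the (count, index) components of the option fold over A's tuples
theorem pvPair (kw : List String) (f : (Int × String) → String × Int × Int)
    (hf : ∀ q, (f q).2.1 = pvCount kw q.2 ∧ (f q).2.2 = q.1)
    (l : List (Int × String)) : ∀ (y : String × Int × Int),
    ∃ w, (l.map f).foldl (pvBestO (fun x => x.2.1)) (some y) = some w ∧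
      l.foldl (pvStep kw) (y.2.1, y.2.2) = (w.2.1, w.2.2) := by
  induction l with
  | nil => intro y; exact ⟨y, rfl, rfl⟩
  | cons q t ih =>
    intro y
    simp only [List.map_cons, List.foldl_cons]
    have h1 : pvBestO (fun x => x.2.1) (some y) (f q) = some (if y.2.1 < (f q).2.1 then f q else y) := by
      simp [pvBestO]
    rw [h1]
    rcases hf q with ⟨hc, hi⟩
    by_cases hlt : y.2.1 < pvCount kw q.2
    · rw [show pvStep kw (y.2.1, y.2.2) q = ((f q).2.1, (f q).2.2) by simp [pvStep, hlt, hc, hi]]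
      rw [if_pos (by rw [hc]; exact hlt)]
      exact ih (f q)
    · rw [show pvStep kw (y.2.1, y.2.2) q = (y.2.1, y.2.2) by simp [pvStep, hlt]]
      rw [if_neg (by rw [hc]; exact hlt)]
      exact ih y

-- A's append-fold builds the mapped filter of the enumeration
theorem pvScored (kw : List String) (ss : List String) (l : List (Int × String)) :
    ∀ (acc : List (String × Int × Int)),
    l.foldl (fun acc p =>
        if pvCount kw p.2 > 0 then
          acc ++ [(pvContextA ss p.1 p.2, pvCount kw p.2, p.1)]
        else acc) acc
      = acc ++ (l.filter (fun q => decide (pvCount kw q.2 > 0))).map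
          (fun q => (pvContextA ss q.1 q.2, pvCount kw q.2, q.1)) := by
  induction l with
  | nil => intro acc; simp
  | cons q t ih =>
    intro acc
    by_cases hq : pvCount kw q.2 > 0
    · simp only [List.foldl_cons, List.filter_cons, hq, decide_true, if_true, List.map_cons, ih]
      simp
    · simp only [List.foldl_cons, List.filter_cons, hq, decide_false, ih]
      simp

theorem pvCtxList (ss : List String) (k : Nat) (h : k < ss.length) :
    (if (k : Int) > 0 then [(PySem.List.pyGet? ss ((k : Int) - 1)).getD ""] else []) ++
      [ss[k]] ++
      (if (k : Int) < (ss.length : Int) - 1 then [(PySem.List.pyGet? ss ((k : Int) + 1)).getD ""] else [])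
    = PySem.List.slice ss (some (max ((k : Int) - 1) 0)) (some ((k : Int) + 2)) := by
  have htail : (ss.drop (k + 1)).take 1 =
      (if (k : Int) < (ss.length : Int) - 1
       then [(PySem.List.pyGet? ss ((k : Int) + 1)).getD ""] else []) := by
    by_cases hl : k + 1 < ss.length
    · have hc : (k : Int) < (ss.length : Int) - 1 := by omega
      rw [List.drop_eq_getElem_cons hl]
      have hget : PySem.List.pyGet? ss ((k : Int) + 1) = ss[k + 1]? := by
        rw [show ((k : Int) + 1) = ((k + 1 : Nat) : Int) by push_cast; ring,
          PySem.List.pyGet?_natCast]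
      rw [if_pos hc, hget, List.getElem?_eq_getElem hl, List.take_succ_cons]
      simp
    · have hc : ¬ ((k : Int) < (ss.length : Int) - 1) := by omega
      rw [List.drop_eq_nil_of_le (by omega), if_neg hc, List.take_nil]
  have h2 : ((k : Int) + 2) = ((k + 2 : Nat) : Int) := by push_cast; ring
  rcases Nat.eq_zero_or_pos k with hk0 | hkpos
  · subst hk0
    have hmax : max (((0 : Nat) : Int) - 1) 0 = ((0 : Nat) : Int) := by omega
    rw [hmax, h2, PySem.List.slice_natCast]
    have hng : ¬ (((0 : Nat) : Int) > 0) := by omega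
    rw [if_neg hng]
    rw [show (0 + 2 - 0 : Nat) = 2 from rfl]
    rcases ss with _ | ⟨x, t⟩
    · simp at h
    · simp only [List.drop_succ_cons] at htail
      simp only [List.drop_zero, List.take_succ_cons, List.getElem_cons_zero, List.nil_append,
        List.cons_append] at *
      rw [htail]
  · have hmax : max (((k : Nat) : Int) - 1) 0 = ((k - 1 : Nat) : Int) := by omega
    rw [hmax, h2, PySem.List.slice_natCast]
    have hcnt : k + 2 - (k - 1) = 3 := by omega
    rw [hcnt]
    have hd1 : ss.drop (k - 1) = ss[k - 1] :: ss.drop k := by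
      have := List.drop_eq_getElem_cons (l := ss) (i := k - 1) (h := by omega)
      rwa [show k - 1 + 1 = k by omega] at this
    have hd2 : ss.drop k = ss[k] :: ss.drop (k + 1) := List.drop_eq_getElem_cons h
    rw [hd1, hd2, List.take_succ_cons, List.take_succ_cons]
    have hpos : ((k : Nat) : Int) > 0 := by omega
    rw [if_pos hpos]
    have hget : PySem.List.pyGet? ss ((k : Int) - 1) = ss[k - 1]? := by
      rw [show ((k : Int) - 1) = ((k - 1 : Nat) : Int) by omega, PySem.List.pyGet?_natCast]
    rw [hget, List.getElem?_eq_getElem (by omega), htail]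
    rfl

-- A's three-way context build equals B's slice, at any valid index
theorem pvCtx (ss : List String) (k : Nat) (h : k < ss.length) :
    pvContextA ss (k : Int) ss[k] = pvContextB ss (k : Int) := by
  unfold pvContextA pvContextB
  rw [pvCtxList ss k h]

-- ===== VERDICT =====
theorem extract_relevant_excerpt_py_spec : Claim_equal_extract_relevant_excerpt_py := by
  intro content keywords max_length _dom
  unfold Spec_extract_relevant_excerpt_py
  unfold extract_relevant_excerpt_py extract_relevant_excerpt_py_alt
  by_cases hc : content = "" ∨ keywords = []
  · rw [if_pos hc, if_pos hc]
  · rw [if_neg hc, if_neg hc]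
    simp only []
    set ss := pvSentences content with hss
    set f : (Int × String) → String × Int × Int :=
      (fun q => (pvContextA ss q.1 q.2, pvCount keywords q.2, q.1)) with hf
    rw [pvScored keywords ss (PySem.List.enumerate ss) []]
    rw [show (fun (acc : Int × Int) p =>
        if pvCount keywords p.2 > acc.1 then (pvCount keywords p.2, p.1) else acc) = pvStep keywords
      from by funext a p; simp [pvStep]]
    rw [pvSkip keywords (PySem.List.enumerate ss) (0, -1) (by norm_num)]
    simp only [List.nil_append]
    set F := (PySem.List.enumerate ss).filter (fun q => decide (pvCount keywords q.2 > 0)) with hF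
    rcases hFc : F with _ | ⟨q0, rest⟩
    · simp only [List.map_nil]
      rw [show PySem.List.sorted ([] : List (String × Int × Int)) (fun x => x.2.1) true = [] by
        rw [PySem.List.sorted_eq_nil_iff]]
      simp only [List.foldl_nil]
      norm_num
    · -- F nonempty
      have hq0F : q0 ∈ F := by rw [hFc]; exact List.mem_cons_self
      have hq0pos : pvCount keywords q0.2 > 0 := by
        have := List.of_mem_filter hq0F
        simpa using this
      have hstep0 : pvStep keywords (0, -1) q0 = ((f q0).2.1, (f q0).2.2) := by
        simp [pvStep, hf, hq0pos]
      obtain ⟨w, hw1, hw2⟩ := pvPair keywords f (by intro q; exact ⟨rfl, rfl⟩) rest (f q0)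
      have hhead : (PySem.List.sorted ((q0 :: rest).map f) (fun x => x.2.1) true).head? = some w := by
        rw [pvL1]
        simp only [List.map_cons, List.foldl_cons]
        rw [show pvBestO (fun x => x.2.1) none (f q0) = some (f q0) from rfl]
        exact hw1
      have hfold : (q0 :: rest).foldl (pvStep keywords) (0, -1) = (w.2.1, w.2.2) := by
        simp only [List.foldl_cons, hstep0]
        exact hw2
      rw [hfold]
      -- identify w
      have hwmem : w ∈ (q0 :: rest).map f := by
        rcases pvBestO_mem (fun x => x.2.1) (rest.map f) (some (f q0)) w hw1 with h1 | h1
        · exact List.mem_cons_of_mem _ h1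
        · simp only [Option.some.injEq] at h1
          rw [← h1]; exact List.mem_cons_self
      obtain ⟨q, hqmem, hfq⟩ := List.mem_map.mp hwmem
      have hqE : q ∈ PySem.List.enumerate ss := by
        have : q ∈ F := by rw [hFc]; exact hqmem
        exact List.mem_of_mem_filter this
      obtain ⟨k, hk, hqeq⟩ := (PySem.List.mem_enumerate_iff _ _ _).mp hqE
      have hq1 : q.1 = (k : Int) := by rw [hqeq]; simp
      have hq2 : q.2 = ss[k] := by rw [hqeq]
      have hw22 : w.2.2 = (k : Int) := by rw [← hfq, hf]; exact hq1
      have hnneg : ¬ (w.2.2 < 0) := by rw [hw22]; omega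
      rw [if_neg hnneg]
      have hw1eq : w.1 = pvContextB ss w.2.2 := by
        rw [← hfq, hf]
        simp only
        rw [hq1, hq2, pvCtx ss k hk, hw22.symm, ← hfq, hf]
      -- the match: sorted is a cons with head w
      rcases hsort : PySem.List.sorted ((q0 :: rest).map f) (fun x => x.2.1) true with _ | ⟨b, t⟩
      · rw [hsort] at hhead; simp at hhead
      · rw [hsort] at hhead
        simp only [List.head?] at hhead
        injection hhead with hb
        subst hb
        show pvTrim b.1 max_length = pvTrim (pvContextB ss b.2.2) max_length
        rw [hw1eq]
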